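-- pv_equiv track=rewrite | github.com/PhillipWangAust/paillier | phe/tests/math_test.py | add_product
-- ===== SOURCE A (Python) =====
-- def  add_product(a,b):
--     alen = len(a)
--     blen = len(b)
--     addAB=[]
--     ABline=[]
--     if(alen<blen):
--         a=lena2b(a,alen,blen)
--     elif(alen>blen):
--         b=lena2b(b,blen,alen)
--     length=max(alen,blen)
--     for i in range(0,length):
--         for j in range(0,length):
--             ABline.append(a[i][j]+(b[i][j]))
--         addAB.append(ABline)
--         ABline=[]
--     return addAB
--
-- def lena2b(a,alen,blen):
--     ilist = []
--     new_a = []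
--     for i in range(0, blen):
--         for j in range(0, blen):
--             if i < alen:
--                 if j < alen:
--                     ilist.append(a[i][j])
--                 else:
--                     zero = 0
--                     ilist.append(zero)
--             else:
--                 zero = 0
--                 ilist.append(zero)
--         new_a.append(ilist)
--         ilist = []
--     return new_a
-- ===== SOURCE B (Python) =====
-- def add_product(a, b):
--     n = max(len(a), len(b))
--     return [[(a[i][j] if i < len(a) and j < len(a) else 0)
--              + (b[i][j] if i < len(b) and j < len(b) else 0)
--              for j in range(n)]
--             for i in range(n)]
-- ===== Notes on version B (the rewrite author's own statement) =====
-- stated objective: simpler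
-- what changed: B drops the lena2b padding helper and the intermediate padded matrix entirely, producing each entry directly in one nested comprehension with per-matrix bound guards that zero-fill exactly where A's padding does.
import Mathlib
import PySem

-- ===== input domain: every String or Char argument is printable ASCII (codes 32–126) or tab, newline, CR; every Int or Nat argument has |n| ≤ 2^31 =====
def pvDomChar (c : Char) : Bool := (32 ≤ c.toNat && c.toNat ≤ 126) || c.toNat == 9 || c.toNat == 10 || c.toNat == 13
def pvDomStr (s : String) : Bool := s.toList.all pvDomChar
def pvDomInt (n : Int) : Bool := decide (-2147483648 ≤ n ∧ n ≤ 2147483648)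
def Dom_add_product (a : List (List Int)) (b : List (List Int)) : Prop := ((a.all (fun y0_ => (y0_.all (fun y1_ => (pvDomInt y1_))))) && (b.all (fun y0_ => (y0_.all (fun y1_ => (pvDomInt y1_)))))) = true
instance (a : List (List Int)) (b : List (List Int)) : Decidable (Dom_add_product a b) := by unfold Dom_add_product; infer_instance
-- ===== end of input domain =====

-- B removes the lena2b padding pass and intermediate padded matrix, computing each entry
-- directly with guarded indexing; equal to A on all inputs where A does not raise IndexError.

-- ===== PORT A =====
def lena2b (a : List (List Int)) (alen blen : Int) : List (List Int) :=
  (PySem.List.pyRange 0 blen 1).foldl (fun new_a i =>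
    new_a ++ [(PySem.List.pyRange 0 blen 1).foldl (fun ilist j =>
      ilist ++ [if i < alen then
                  (if j < alen then PySem.List.pyGetD (PySem.List.pyGetD a i []) j 0 else 0)
                else 0]) []]) []

def add_product (a : List (List Int)) (b : List (List Int)) : List (List Int) :=
  let alen : Int := a.length
  let blen : Int := b.length
  let a := if alen < blen then lena2b a alen blen else a
  let b := if alen > blen then lena2b b blen alen else b
  let length : Int := max alen blen
  (PySem.List.pyRange 0 length 1).foldl (fun addAB i =>
    addAB ++ [(PySem.List.pyRange 0 length 1).foldl (fun ABline j =>
      ABline ++ [PySem.List.pyGetD (PySem.List.pyGetD a i []) j 0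
                 + PySem.List.pyGetD (PySem.List.pyGetD b i []) j 0]) []]) []

-- ===== PORT B =====
def add_product_alt (a : List (List Int)) (b : List (List Int)) : List (List Int) :=
  let n : Int := max (a.length : Int) (b.length : Int)
  (PySem.List.pyRange 0 n 1).map (fun i =>
    (PySem.List.pyRange 0 n 1).map (fun j =>
      (if i < (a.length : Int) ∧ j < (a.length : Int) then
         PySem.List.pyGetD (PySem.List.pyGetD a i []) j 0 else 0)
      + (if i < (b.length : Int) ∧ j < (b.length : Int) then
           PySem.List.pyGetD (PySem.List.pyGetD b i []) j 0 else 0)))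

-- ===== PRECONDITION & SPEC =====
-- Pre_ excludes exactly the inputs where Python A raises IndexError (a row shorter than its
-- matrix's row count is indexed past its end).
def Pre_add_product (a : List (List Int)) (b : List (List Int)) : Prop :=
  (∀ r ∈ a, a.length ≤ r.length) ∧ (∀ r ∈ b, b.length ≤ r.length)
instance (a : List (List Int)) (b : List (List Int)) : Decidable (Pre_add_product a b) := by
  unfold Pre_add_product; infer_instance
def pvWitness_add_product : List (List Int) × List (List Int) := ([[1, 2], [3, 4]], [[5]])

def Spec_add_product (a : List (List Int)) (b : List (List Int)) (out : List (List Int)) : Prop := out = add_product_alt a b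
instance (a : List (List Int)) (b : List (List Int)) (out : List (List Int)) : Decidable (Spec_add_product a b out) := by unfold Spec_add_product; infer_instance

-- ===== CLAIM (what is proved, stated in full; the proofs are below) =====
def Claim_equal_add_product : Prop := ∀ (a : List (List Int)) (b : List (List Int)), Dom_add_product a b → Pre_add_product a b → Spec_add_product a b (add_product a b)

-- ===== LEMMAS AND PROOFS =====

theorem pv_flatten_map_singleton {α β : Type} (l : List α) (f : α → β) :
    (l.map (fun x => [f x])).flatten = l.map f := by
  induction l with
  | nil => rfl
  | cons x xs ih => simp [ih]

theorem lena2b_eq_map (a : List (List Int)) (alen blen : Int) :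
    lena2b a alen blen =
      (PySem.List.pyRange 0 blen 1).map (fun i =>
        (PySem.List.pyRange 0 blen 1).map (fun j =>
          if i < alen then
            (if j < alen then PySem.List.pyGetD (PySem.List.pyGetD a i []) j 0 else 0)
          else 0)) := by
  unfold lena2b
  simp [pv_flatten_map_singleton]

theorem add_product_eq_map (a : List (List Int)) (b : List (List Int)) :
    add_product a b =
      (PySem.List.pyRange 0 (max (a.length : Int) (b.length : Int)) 1).map (fun i =>
        (PySem.List.pyRange 0 (max (a.length : Int) (b.length : Int)) 1).map (fun j =>
          PySem.List.pyGetD (PySem.List.pyGetD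
              (if (a.length : Int) < (b.length : Int) then lena2b a a.length b.length else a) i []) j 0
          + PySem.List.pyGetD (PySem.List.pyGetD
              (if (a.length : Int) > (b.length : Int) then lena2b b b.length a.length else b) i []) j 0)) := by
  unfold add_product
  simp [pv_flatten_map_singleton]

-- entry of a padded matrix, for in-range indices
theorem pad_entry (a : List (List Int)) (alen blen i j : Int)
    (hi0 : 0 ≤ i) (hi : i < blen) (hj0 : 0 ≤ j) (hj : j < blen) :
    PySem.List.pyGetD (PySem.List.pyGetD (lena2b a alen blen) i []) j 0 =
      if i < alen ∧ j < alen then PySem.List.pyGetD (PySem.List.pyGetD a i []) j 0 else 0 := by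
  rw [lena2b_eq_map]
  rw [PySem.List.pyGetD_map_pyRange_of_nonneg _ blen i _ hi0 hi]
  rw [PySem.List.pyGetD_map_pyRange_of_nonneg _ blen j _ hj0 hj]
  by_cases h1 : i < alen <;> by_cases h2 : j < alen <;> simp [h1, h2]

-- ===== VERDICT (by name: the statement is the Claim_ definition above) =====
theorem add_product_spec : Claim_equal_add_product := by
  intro a b _ _
  unfold Spec_add_product add_product_alt
  rw [add_product_eq_map]
  apply List.map_congr_left
  intro i hi
  rw [PySem.List.mem_pyRange_one] at hi
  apply List.map_congr_left
  intro j hj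
  rw [PySem.List.mem_pyRange_one] at hj
  rcases Int.lt_or_le (a.length : Int) (b.length : Int) with hab | hab
  · -- a is padded, b is read directly
    rw [if_pos hab, if_neg (by omega)]
    rw [pad_entry a a.length b.length i j hi.1 (by omega) hj.1 (by omega)]
    rw [if_pos (show i < (b.length : Int) ∧ j < (b.length : Int) from ⟨by omega, by omega⟩)]
  · rcases Int.lt_or_le (b.length : Int) (a.length : Int) with hba | hba
    · -- b is padded, a is read directly
      rw [if_neg (by omega), if_pos hba]
      rw [pad_entry b b.length a.length i j hi.1 (by omega) hj.1 (by omega)]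
      rw [if_pos (show i < (a.length : Int) ∧ j < (a.length : Int) from ⟨by omega, by omega⟩)]
    · -- equal lengths, no padding
      have he : (a.length : Int) = (b.length : Int) := le_antisymm hba hab
      rw [if_neg (by omega), if_neg (by omega)]
      rw [if_pos (show i < (a.length : Int) ∧ j < (a.length : Int) from ⟨by omega, by omega⟩),
          if_pos (show i < (b.length : Int) ∧ j < (b.length : Int) from ⟨by omega, by omega⟩)]
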